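-- pv_equiv track=rewrite | github.com/tatangharyadi/algorithm | string/t9.py | predictive_text
-- ===== SOURCE A (Python) =====
-- t9 = '22233344455566677778889999'
--
-- def letter_to_digit(x):
--     assert 'a' <= x <= 'z'
--     return t9[ord(x) - ord('a')]
--
-- def code_word(word):
--     return ''.join(map(letter_to_digit, word))
--
-- def predictive_text(dic):
--     # total_weight[p] = total weight of words having prefix p
--     total_weight = {}
--     for word, weight in dic.items():
--         prefix = ''
--         for x in word:
--             prefix += x
--             if prefix in total_weight:
--                 total_weight[prefix] += weight
--             else:
--                 total_weight[prefix] = weight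
--
--     # prop[s] = prefix to display for s
--     prop = {}
--     for prefix in total_weight:
--         code = code_word(prefix)
--         if (code not in prop
--             or total_weight[prop[code]] < total_weight[prefix]):
--             prop[code] = prefix
--     return prop
-- ===== SOURCE B (Python) =====
-- T9 = '22233344455566677778889999'
--
-- def _code(p):
--     return ''.join(T9[ord(c) - 97] for c in p)
--
-- def _weight(dic, p):
--     return sum(w for word, w in dic.items() if word.startswith(p))
--
-- def predictive_text(dic):
--     # all distinct non-empty prefixes, in first-appearance order
--     prefixes = []
--     for word in dic:
--         p = ''
--         for x in word:
--             p += x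
--             if p not in prefixes:
--                 prefixes.append(p)
--     # group prefixes by T9 code (codes in first-appearance order) and take,
--     # per code, the first prefix of maximal total weight (weight computed by
--     # a direct scan of the dictionary, no accumulator dict)
--     result = {}
--     remaining = prefixes
--     while remaining:
--         c = _code(remaining[0])
--         group = [q for q in remaining if _code(q) == c]
--         result[c] = max(group, key=lambda q: _weight(dic, q))
--         remaining = [q for q in remaining if _code(q) != c]
--     return result
-- ===== Notes on version B (the rewrite author's own statement) =====
-- stated objective: alternative
-- what changed: B replaces A's running weight-accumulation dict and sequential keep-best pass by a declarative formulation: enumerate the distinct non-empty prefixes, compute each prefix's total weight by a direct startswith scan of the dictionary, and build the answer code-group by code-group, taking max(group, key=weight) per T9 code.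
import Mathlib
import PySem

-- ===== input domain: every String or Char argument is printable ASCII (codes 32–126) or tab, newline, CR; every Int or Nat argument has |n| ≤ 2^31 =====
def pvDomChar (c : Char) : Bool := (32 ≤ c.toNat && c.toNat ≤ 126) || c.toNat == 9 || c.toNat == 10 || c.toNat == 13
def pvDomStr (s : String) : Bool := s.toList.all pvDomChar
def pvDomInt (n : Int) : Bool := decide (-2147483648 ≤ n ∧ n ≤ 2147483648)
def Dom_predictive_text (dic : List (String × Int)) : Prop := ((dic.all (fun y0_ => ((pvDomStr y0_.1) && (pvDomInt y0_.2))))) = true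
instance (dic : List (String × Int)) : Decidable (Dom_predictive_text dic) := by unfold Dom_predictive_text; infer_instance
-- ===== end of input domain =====

-- B replaces A's accumulator dicts by a declarative formulation (distinct prefixes, per-prefix
-- weight by direct scan, per-code argmax over the code's group); proved equal to A wherever A returns.


-- ===== PORT A =====
-- t9 = '22233344455566677778889999'
def pvT9 : List Char := "22233344455566677778889999".toList

-- letter_to_digit: t9[ord(x) - ord('a')]; the assert/IndexError cases are outside Pre_
def letter_to_digit (x : Char) : Char :=
  (PySem.List.pyGet? pvT9 ((x.toNat : Int) - 97)).getD '?'

-- code_word: ''.join(map(letter_to_digit, word))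
def code_word (w : List Char) : List Char := w.map letter_to_digit

-- body of A's inner 'for x in word' loop: state = (total_weight, prefix)
def pvAStep (weight : Int) (st : PySem.Dict (List Char) Int × List Char) (x : Char) :
    PySem.Dict (List Char) Int × List Char :=
  let pref := st.2 ++ [x]
  let tw := if st.1.contains pref
            then st.1.insert pref (st.1.getD pref 0 + weight)
            else st.1.insert pref weight
  (tw, pref)

-- body of A's outer 'for word, weight in dic.items()' loop
def pvAOuter (tw : PySem.Dict (List Char) Int) (wp : String × Int) :
    PySem.Dict (List Char) Int :=
  (wp.1.toList.foldl (pvAStep wp.2) (tw, ([] : List Char))).1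

-- body of A's 'for prefix in total_weight' loop
def pvAProp (tw : PySem.Dict (List Char) Int)
    (prop : PySem.Dict (List Char) (List Char)) (pref : List Char) :
    PySem.Dict (List Char) (List Char) :=
  if prop.contains (code_word pref) = false
      ∨ tw.getD (prop.getD (code_word pref) []) 0 < tw.getD pref 0
  then prop.insert (code_word pref) pref else prop

def predictive_text (dic : List (String × Int)) : List (String × String) :=
  let items := (PySem.Dict.ofList dic).items
  let tw := items.foldl pvAOuter (PySem.Dict.empty : PySem.Dict (List Char) Int)
  let prop := tw.keys.foldl (pvAProp tw)
    (PySem.Dict.empty : PySem.Dict (List Char) (List Char))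
  prop.items.map (fun p => (String.ofList p.1, String.ofList p.2))

-- ===== PORT B =====
-- T9 = '22233344455566677778889999'
def pvT9B : List Char := "22233344455566677778889999".toList

-- _code: ''.join(T9[ord(c) - 97] for c in p)
def bDigit (c : Char) : Char := (PySem.List.pyGet? pvT9B ((c.toNat : Int) - 97)).getD '?'
def bCode (p : List Char) : List Char := p.map bDigit

-- _weight: sum(w for word, w in dic.items() if word.startswith(p))
def bWeight (items : List (String × Int)) (p : List Char) : Int :=
  ((items.filter (fun wp => PySem.Chars.startswith wp.1.toList p)).map (fun wp => wp.2)).sum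

-- body of B's prefix-collection inner loop: state = (prefixes, p)
def bPrefStep (st : List (List Char) × List Char) (x : Char) : List (List Char) × List Char :=
  let p := st.2 ++ [x]
  ((if p ∈ st.1 then st.1 else st.1 ++ [p]), p)

-- body of B's 'for word in dic' loop
def bPrefOuter (acc : List (List Char)) (wp : String × Int) : List (List Char) :=
  (wp.1.toList.foldl bPrefStep (acc, ([] : List Char))).1

-- B's 'while remaining:' loop; the result dict's keys are fresh each iteration,
-- so the dict is exactly the list of inserted (code, best) pairs in order
def bPick (items : List (String × Int)) (remaining : List (List Char)) :
    List (List Char × List Char) :=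
  match remaining with
  | [] => []
  | p :: rest =>
    let c := bCode p
    let group := (p :: rest).filter (fun q => bCode q == c)
    let best := (PySem.List.max? group (fun q => bWeight items q)).getD p
    (c, best) :: bPick items (rest.filter (fun q => !(bCode q == c)))
termination_by remaining.length
decreasing_by
  simp only [List.length_cons, List.length_unattach]
  exact Nat.lt_succ_of_le (le_trans (List.length_filter_le _ _) (by simp))

def predictive_text_alt (dic : List (String × Int)) : List (String × String) :=
  let items := (PySem.Dict.ofList dic).items
  let prefixes := items.foldl bPrefOuter []
  (bPick items prefixes).map (fun p => (String.ofList p.1, String.ofList p.2))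

-- ===== PRECONDITION & SPEC =====
-- Pre_ excludes exactly the inputs where Python A raises: any word with a character
-- outside 'a'..'z' makes letter_to_digit's assert fail (AssertionError).
def Pre_predictive_text (dic : List (String × Int)) : Prop :=
  (dic.all (fun p => p.1.toList.all (fun c => 97 ≤ c.toNat && c.toNat ≤ 122))) = true
instance (dic : List (String × Int)) : Decidable (Pre_predictive_text dic) := by
  unfold Pre_predictive_text; infer_instance

def pvWitness_predictive_text : (List (String × Int)) := [("ab", 5), ("b", 2), ("ac", 3)]

def Spec_predictive_text (dic : List (String × Int)) (out : List (String × String)) : Prop :=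
  out = predictive_text_alt dic
instance (dic : List (String × Int)) (out : List (String × String)) :
    Decidable (Spec_predictive_text dic out) := by unfold Spec_predictive_text; infer_instance

-- ===== CLAIM (what is proved, stated in full; the proofs are below) =====
def Claim_equal_predictive_text : Prop :=
  ∀ (dic : List (String × Int)), Dom_predictive_text dic → Pre_predictive_text dic →
    Spec_predictive_text dic (predictive_text dic)

-- ===== LEMMAS AND PROOFS =====

-- the two T9 tables and encoders are the same function
theorem bCode_eq : bCode = code_word := by
  funext p; simp [bCode, code_word, bDigit, letter_to_digit, pvT9B, pvT9]

-- A's if/else weight update is one unconditional insert (0 + w = w on a fresh key)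
theorem pvAStep_eq (w : Int) (st : PySem.Dict (List Char) Int × List Char) (x : Char) :
    pvAStep w st x = (st.1.insert (st.2 ++ [x]) (st.1.getD (st.2 ++ [x]) 0 + w), st.2 ++ [x]) := by
  unfold pvAStep
  by_cases h : st.1.contains (st.2 ++ [x]) = true
  · simp [h]
  · have hf : st.1.contains (st.2 ++ [x]) = false := by simpa using h
    simp [h, PySem.Dict.getD_of_not_contains _ _ hf]

theorem bWeight_append (done : List (String × Int)) (wp : String × Int) (p : List Char) :
    bWeight (done ++ [wp]) p
      = bWeight done p + (if p <+: wp.1.toList then wp.2 else 0) := by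
  unfold bWeight
  rw [List.filter_append, List.map_append, List.sum_append]
  congr 1
  by_cases h : p <+: wp.1.toList
  · have hs : PySem.Chars.startswith wp.1.toList p = true := (PySem.Chars.startswith_iff _ _).2 h
    simp [hs, h]
  · have hs : PySem.Chars.startswith wp.1.toList p = false := by
      cases hb : PySem.Chars.startswith wp.1.toList p
      · rfl
      · exact absurd ((PySem.Chars.startswith_iff _ _).1 hb) h
    simp [hs, h]

theorem bWeight_nil (p : List Char) : bWeight [] p = 0 := rfl

-- B's prefix list only grows
theorem bPref_mono (cs : List Char) (acc : List (List Char)) (pref : List Char) :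
    ∀ p ∈ acc, p ∈ (cs.foldl bPrefStep (acc, pref)).1 := by
  induction cs generalizing acc pref with
  | nil => intro p hp; simpa using hp
  | cons x cs ih =>
      intro p hp
      simp only [List.foldl_cons, bPrefStep]
      exact ih _ _ p (by split <;> simp [hp])

-- joint invariant of A's inner weight loop and B's inner prefix loop
theorem pvInner (cs : List Char) (wt : Int) (W : List Char → Int) :
    ∀ (tw : PySem.Dict (List Char) Int) (acc : List (List Char)) (pref : List Char),
    tw.keys = acc →
    (∀ p ∈ acc, p ≠ []) →
    (∀ p ∈ acc, tw.getD p 0 = W p + (if p <+: pref then wt else 0)) →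
    (∀ p : List Char, p ≠ [] → p ∉ acc → W p = 0) →
    (let tw' := (cs.foldl (pvAStep wt) (tw, pref)).1
     let acc' := (cs.foldl bPrefStep (acc, pref)).1
     tw'.keys = acc' ∧
     (∀ p ∈ acc', p ≠ []) ∧
     (∀ p ∈ acc', tw'.getD p 0 = W p + (if p <+: pref ++ cs then wt else 0)) ∧
     (∀ p : List Char, p ≠ [] → p <+: pref ++ cs → ¬ p <+: pref → p ∈ acc')) := by
  induction cs with
  | nil =>
      intro tw acc pref h1 h2 h3 h4
      refine ⟨h1, h2, by simpa using h3, ?_⟩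
      intro p _ hp hnp
      exact absurd (by simpa using hp) hnp
  | cons x cs ih =>
      intro tw acc pref h1 h2 h3 h4
      simp only [List.foldl_cons, pvAStep_eq, bPrefStep]
      have hconcat : ∀ p : List Char, p <+: pref ++ [x] ↔ p <+: pref ∨ p = pref ++ [x] := by
        intro p; rw [List.prefix_concat_iff]; tauto
      have hnotpref : ¬ (pref ++ [x]) <+: pref := by
        intro hh
        have := hh.length_le
        simp at this
      -- the new prefix's stored weight after the insert
      have hval : tw.getD (pref ++ [x]) 0 + wt = W (pref ++ [x]) + wt := by
        by_cases hm : (pref ++ [x]) ∈ acc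
        · rw [h3 _ hm, if_neg hnotpref, add_zero]
        · have hc : tw.contains (pref ++ [x]) = false := by
            cases hb : tw.contains (pref ++ [x])
            · rfl
            · exact absurd (h1 ▸ (PySem.Dict.contains_iff_mem_keys tw _).1 hb) hm
          rw [PySem.Dict.getD_of_not_contains _ _ hc, h4 _ (by simp) hm]
      have key : (tw.insert (pref ++ [x]) (tw.getD (pref ++ [x]) 0 + wt)).keys
          = (if (pref ++ [x]) ∈ acc then acc else acc ++ [pref ++ [x]]) := by
        by_cases hm : (pref ++ [x]) ∈ acc
        · rw [if_pos hm, PySem.Dict.keys_insert_of_contains _ _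
            ((PySem.Dict.contains_iff_mem_keys tw _).2 (h1 ▸ hm)), h1]
        · have hc : tw.contains (pref ++ [x]) = false := by
            cases hb : tw.contains (pref ++ [x])
            · rfl
            · exact absurd (h1 ▸ (PySem.Dict.contains_iff_mem_keys tw _).1 hb) hm
          rw [if_neg hm, PySem.Dict.keys_insert_of_not_contains _ _ hc, h1]
      have h2' : ∀ p ∈ (if (pref ++ [x]) ∈ acc then acc else acc ++ [pref ++ [x]]), p ≠ [] := by
        intro p hp
        by_cases hm : (pref ++ [x]) ∈ acc
        · exact h2 p (by rwa [if_pos hm] at hp)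
        · rw [if_neg hm, List.mem_append] at hp
          rcases hp with hp | hp
          · exact h2 p hp
          · simp only [List.mem_singleton] at hp
            subst hp; simp
      have h3' : ∀ p ∈ (if (pref ++ [x]) ∈ acc then acc else acc ++ [pref ++ [x]]),
          (tw.insert (pref ++ [x]) (tw.getD (pref ++ [x]) 0 + wt)).getD p 0
            = W p + (if p <+: pref ++ [x] then wt else 0) := by
        intro p hp
        by_cases hpx : p = pref ++ [x]
        · subst hpx
          rw [PySem.Dict.getD_eq_get?_getD, PySem.Dict.get?_insert_self]
          simp only [Option.getD_some]
          rw [hval, if_pos (by exact List.prefix_refl _)]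
        · have hpm : p ∈ acc := by
            by_cases hm : (pref ++ [x]) ∈ acc
            · rwa [if_pos hm] at hp
            · rw [if_neg hm, List.mem_append] at hp
              rcases hp with hp | hp
              · exact hp
              · exact absurd (List.mem_singleton.1 hp) hpx
          have : (tw.insert (pref ++ [x]) (tw.getD (pref ++ [x]) 0 + wt)).getD p 0
              = tw.getD p 0 := by
            rw [PySem.Dict.getD_eq_get?_getD, PySem.Dict.get?_insert_of_ne _ _ hpx,
              ← PySem.Dict.getD_eq_get?_getD]
          rw [this, h3 p hpm]
          congr 1
          by_cases hpp : p <+: pref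
          · rw [if_pos hpp, if_pos ((hconcat p).2 (Or.inl hpp))]
          · rw [if_neg hpp, if_neg (fun hh => by
              rcases (hconcat p).1 hh with h | h
              · exact hpp h
              · exact hpx h)]
      have h4' : ∀ p : List Char, p ≠ [] →
          p ∉ (if (pref ++ [x]) ∈ acc then acc else acc ++ [pref ++ [x]]) → W p = 0 := by
        intro p hne hp
        apply h4 p hne
        intro hm
        apply hp
        split <;> simp [hm]
      have := ih (tw.insert (pref ++ [x]) (tw.getD (pref ++ [x]) 0 + wt))
        (if (pref ++ [x]) ∈ acc then acc else acc ++ [pref ++ [x]]) (pref ++ [x])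
        key h2' h3' h4'
      refine ⟨this.1, this.2.1, ?_, ?_⟩
      · intro p hp
        rw [this.2.2.1 p hp]
        simp only [List.append_assoc, List.singleton_append]
      · intro p hne hp hnp
        rw [show pref ++ x :: cs = (pref ++ [x]) ++ cs by simp] at hp
        by_cases hpx : p <+: pref ++ [x]
        · rcases (hconcat p).1 hpx with h | h
          · exact absurd h hnp
          · subst h
            have hmem : (pref ++ [x]) ∈ (if (pref ++ [x]) ∈ acc then acc
                else acc ++ [pref ++ [x]]) := by split <;> simp_all
            exact bPref_mono cs _ _ _ hmem
        · exact this.2.2.2 p hne hp hpx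

-- joint invariant of the two outer loops
theorem pvOuter (its : List (String × Int)) :
    ∀ (tw : PySem.Dict (List Char) Int) (acc : List (List Char)) (done : List (String × Int)),
    tw.keys = acc →
    (∀ p ∈ acc, p ≠ []) →
    (∀ p ∈ acc, tw.getD p 0 = bWeight done p) →
    (∀ p : List Char, p ≠ [] → p ∉ acc → bWeight done p = 0) →
    (let tw' := its.foldl pvAOuter tw
     let acc' := its.foldl bPrefOuter acc
     tw'.keys = acc' ∧
     (∀ p ∈ acc', tw'.getD p 0 = bWeight (done ++ its) p)) := by
  induction its with
  | nil =>
      intro tw acc done h1 _ h3 _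
      exact ⟨h1, by simpa using h3⟩
  | cons wp its ih =>
      intro tw acc done h1 h2 h3 h4
      simp only [List.foldl_cons, pvAOuter, bPrefOuter]
      have h3' : ∀ p ∈ acc, tw.getD p 0 = bWeight done p + (if p <+: ([] : List Char) then wp.2 else 0) := by
        intro p hp
        rw [h3 p hp]
        have : ¬ p <+: ([] : List Char) := by
          intro hh
          exact h2 p hp (List.prefix_nil.1 hh)
        rw [if_neg this, add_zero]
      have hin := pvInner wp.1.toList wp.2 (bWeight done) tw acc [] h1 h2 h3' h4
      simp only [List.nil_append] at hin
      have hnext := ih (wp.1.toList.foldl (pvAStep wp.2) (tw, [])).1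
        (wp.1.toList.foldl bPrefStep (acc, [])).1 (done ++ [wp])
        hin.1 hin.2.1
        (by
          intro p hp
          rw [hin.2.2.1 p hp, bWeight_append]
          rfl)
        (by
          intro p hne hp
          rw [bWeight_append]
          have hold : bWeight done p = 0 := by
            apply h4 p hne
            intro hm
            exact hp (bPref_mono wp.1.toList acc [] p hm)
          have hnpref : ¬ p <+: wp.1.toList := by
            intro hh
            apply hp
            apply hin.2.2.2 p hne hh
            intro hnil
            exact hne (List.prefix_nil.1 hnil)
          rw [hold, if_neg hnpref, add_zero])
      simp only [List.append_assoc, List.cons_append, List.nil_append] at hnext ⊢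
      exact hnext

-- ===== second pass =====

-- the fold step of PySem.List.max? (Python's running first-max)
def pvStepB (w : List Char → Int) (o : Option (List Char)) (q : List Char) : Option (List Char) :=
  match o with
  | none => some q
  | some m => if w m < w q then some q else some m

theorem max?_eq_foldl (g : List (List Char)) (w : List Char → Int) :
    PySem.List.max? g w = g.foldl (pvStepB w) none := by
  unfold PySem.List.max?
  congr 1
  funext o q
  cases o <;> rfl

-- get? characterisation of A's keep-best fold
theorem pvG2 (tw : PySem.Dict (List Char) Int) (L : List (List Char)) :
    ∀ (acc : PySem.Dict (List Char) (List Char)) (k : List Char),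
    (L.foldl (pvAProp tw) acc).get? k
      = (L.filter (fun p => code_word p == k)).foldl (pvStepB (fun p => tw.getD p 0)) (acc.get? k) := by
  induction L with
  | nil => intro acc k; rfl
  | cons p L ih =>
      intro acc k
      by_cases hk : code_word p = k
      · have hf : (p :: L).filter (fun p => code_word p == k)
            = p :: L.filter (fun p => code_word p == k) := by simp [hk]
        rw [hf, List.foldl_cons, List.foldl_cons, ih]
        congr 1
        subst hk
        unfold pvAProp
        by_cases hc : acc.contains (code_word p) = true
        · obtain ⟨q, hq⟩ : ∃ q, acc.get? (code_word p) = some q := by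
            have := PySem.Dict.contains_eq_isSome_get? acc (code_word p)
            rw [hc] at this
            exact Option.isSome_iff_exists.1 this.symm
          have hgd : acc.getD (code_word p) [] = q := by
            rw [PySem.Dict.getD_eq_get?_getD, hq]; rfl
          rw [hq]
          by_cases hlt : tw.getD q 0 < tw.getD p 0
          · rw [if_pos (Or.inr (by rw [hgd]; exact hlt))]
            rw [PySem.Dict.get?_insert_self]
            simp [pvStepB, hlt]
          · rw [if_neg (by rw [hgd]; simp [hc, hlt])]
            rw [hq]
            simp [pvStepB, hlt]
        · have hc' : acc.contains (code_word p) = false := by simpa using hc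
          rw [if_pos (Or.inl hc')]
          rw [PySem.Dict.get?_insert_self]
          rw [(PySem.Dict.get?_eq_none_iff_contains acc (code_word p)).2 hc']
          rfl
      · have hf : (p :: L).filter (fun p => code_word p == k)
            = L.filter (fun p => code_word p == k) := by simp [hk]
        rw [hf, List.foldl_cons, ih]
        congr 1
        unfold pvAProp
        split
        · exact PySem.Dict.get?_insert_of_ne _ _ (fun h => hk h.symm)
        · rfl

-- first-appearance code list
def pvFC (ks : List (List Char)) (L : List (List Char)) : List (List Char) :=
  L.foldl (fun ks p => if code_word p ∈ ks then ks else ks ++ [code_word p]) ks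

-- keys characterisation of A's keep-best fold
theorem pvG1 (tw : PySem.Dict (List Char) Int) (L : List (List Char)) :
    ∀ (acc : PySem.Dict (List Char) (List Char)),
    (L.foldl (pvAProp tw) acc).keys = pvFC acc.keys L := by
  induction L with
  | nil => intro acc; rfl
  | cons p L ih =>
      intro acc
      rw [List.foldl_cons, ih]
      simp only [pvFC, List.foldl_cons]
      congr 1
      unfold pvAProp
      by_cases hm : code_word p ∈ acc.keys
      · have hc : acc.contains (code_word p) = true :=
          (PySem.Dict.contains_iff_mem_keys acc _).2 hm
        rw [if_pos hm]
        split
        · exact PySem.Dict.keys_insert_of_contains acc _ hc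
        · rfl
      · have hc : acc.contains (code_word p) = false := by
          cases hb : acc.contains (code_word p)
          · rfl
          · exact absurd ((PySem.Dict.contains_iff_mem_keys acc _).1 hb) hm
        rw [if_neg hm, if_pos (Or.inl hc)]
        exact PySem.Dict.keys_insert_of_not_contains acc _ hc

theorem pvND (tw : PySem.Dict (List Char) Int) (L : List (List Char)) :
    ∀ (acc : PySem.Dict (List Char) (List Char)), acc.keys.Nodup →
    (L.foldl (pvAProp tw) acc).keys.Nodup := by
  induction L with
  | nil => intro acc h; exact h
  | cons p L ih =>
      intro acc h
      rw [List.foldl_cons]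
      apply ih
      unfold pvAProp
      split
      · exact PySem.Dict.nodup_keys_insert _ _ _ h
      · exact h

theorem pvFC_filter (c : List Char) (L : List (List Char)) :
    ∀ ks, c ∈ ks → pvFC ks (L.filter (fun q => !(code_word q == c))) = pvFC ks L := by
  induction L with
  | nil => intro ks _; rfl
  | cons q L ih =>
      intro ks hc
      by_cases h : code_word q = c
      · have hb : (code_word q == c) = true := by simp [h]
        simp only [List.filter_cons, hb, Bool.not_true, if_neg (by simp : ¬(false = true))]
        rw [ih ks hc]
        have : pvFC ks (q :: L) = pvFC ks L := by
          simp only [pvFC, List.foldl_cons, if_pos (h ▸ hc)]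
        rw [this]
      · have hb : (q :: L).filter (fun q => !(code_word q == c))
            = q :: L.filter (fun q => !(code_word q == c)) := by simp [h]
        rw [hb]
        simp only [pvFC, List.foldl_cons]
        split
        · exact ih ks hc
        · exact ih _ (List.mem_append_left _ hc)

theorem pvFC_cons (c : List Char) (L : List (List Char)) (h : ∀ q ∈ L, code_word q ≠ c) :
    ∀ ks, pvFC (c :: ks) L = c :: pvFC ks L := by
  induction L with
  | nil => intro ks; rfl
  | cons q L ih =>
      intro ks
      have hne : code_word q ≠ c := h q (List.mem_cons_self ..)
      have hmem : code_word q ∈ c :: ks ↔ code_word q ∈ ks := by simp [hne]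
      have ih' := ih (fun r hr => h r (List.mem_cons_of_mem _ hr))
      simp only [pvFC, List.foldl_cons] at *
      by_cases hk : code_word q ∈ ks
      · rw [if_pos (hmem.2 hk), if_pos hk]; exact ih' ks
      · rw [if_neg (fun hh => hk (hmem.1 hh)), if_neg hk, List.cons_append]
        exact ih' (ks ++ [code_word q])

theorem pvFC_mem (L : List (List Char)) :
    ∀ ks k, k ∈ pvFC ks L → k ∈ ks ∨ ∃ q ∈ L, code_word q = k := by
  induction L with
  | nil => intro ks k hk; exact Or.inl hk
  | cons q L ih =>
      intro ks k hk
      simp only [pvFC, List.foldl_cons] at hk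
      by_cases h : code_word q ∈ ks
      · rw [if_pos h] at hk
        rcases ih ks k hk with h1 | ⟨r, hr, hcr⟩
        · exact Or.inl h1
        · exact Or.inr ⟨r, List.mem_cons_of_mem _ hr, hcr⟩
      · rw [if_neg h] at hk
        rcases ih _ k hk with h1 | ⟨r, hr, hcr⟩
        · rcases List.mem_append.1 h1 with h2 | h2
          · exact Or.inl h2
          · exact Or.inr ⟨q, List.mem_cons_self .., (List.mem_singleton.1 h2).symm⟩
        · exact Or.inr ⟨r, List.mem_cons_of_mem _ hr, hcr⟩

-- running first-max with two weight functions agreeing on the traversed elements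
theorem pvFold_congr (wA wB : List Char → Int) (t : List (List Char)) :
    ∀ b, wA b = wB b → (∀ q ∈ t, wA q = wB q) →
    t.foldl (fun b q => if wA b < wA q then q else b) b
      = t.foldl (fun b q => if wB b < wB q then q else b) b := by
  induction t with
  | nil => intro b _ _; rfl
  | cons q t ih =>
      intro b hb hall
      simp only [List.foldl_cons]
      rw [hb, hall q (List.mem_cons_self ..)]
      by_cases h : wB b < wB q
      · simp only [h, if_pos]
        exact ih q (hall q (List.mem_cons_self ..)) (fun r hr => hall r (List.mem_cons_of_mem _ hr))
      · simp only [h, if_false]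
        exact ih b hb (fun r hr => hall r (List.mem_cons_of_mem _ hr))

theorem pvStepB_some (w : List Char → Int) (t : List (List Char)) :
    ∀ b, t.foldl (pvStepB w) (some b) = some (t.foldl (fun b q => if w b < w q then q else b) b) := by
  induction t with
  | nil => intro b; rfl
  | cons q t ih =>
      intro b
      simp only [List.foldl_cons, pvStepB]
      by_cases h : w b < w q <;> simp [h, ih]

-- the main second-pass lemma: A's keep-best fold over L equals B's group-by-code argmax
theorem pvMain (items : List (String × Int)) (tw : PySem.Dict (List Char) Int) :
    ∀ (L : List (List Char)), (∀ p ∈ L, tw.getD p 0 = bWeight items p) →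
    (L.foldl (pvAProp tw) (PySem.Dict.empty : PySem.Dict (List Char) (List Char))).items
      = bPick items L := by
  intro L
  induction hn : L.length using Nat.strong_induction_on generalizing L with
  | _ n ih =>
    cases L with
    | nil =>
        intro _
        rw [bPick]
        rfl
    | cons p rest =>
        intro hw
        rw [bPick]
        simp only [bCode_eq]
        -- abbreviations
        have hlen : (rest.filter (fun q => !(code_word q == code_word p))).length < n := by
          subst hn
          simp only [List.length_cons]
          exact Nat.lt_succ_of_le (List.length_filter_le _ _)
        have hw' : ∀ q ∈ rest.filter (fun q => !(code_word q == code_word p)),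
            tw.getD q 0 = bWeight items q := fun q hq =>
          hw q (List.mem_cons_of_mem _ (List.mem_of_mem_filter hq))
        have hIH := ih _ hlen _ rfl hw'
        -- nodup keys of both folds
        have hndD : ((p :: rest).foldl (pvAProp tw) PySem.Dict.empty).keys.Nodup :=
          pvND tw _ _ (by simp [PySem.Dict.keys_empty])
        have hndD' : ((rest.filter (fun q => !(code_word q == code_word p))).foldl
            (pvAProp tw) PySem.Dict.empty).keys.Nodup :=
          pvND tw _ _ (by simp [PySem.Dict.keys_empty])
        -- codes in the remainder differ from code_word p
        have hcne : ∀ q ∈ rest.filter (fun q => !(code_word q == code_word p)),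
            code_word q ≠ code_word p := by
          intro q hq
          have := List.of_mem_filter hq
          simpa using this
        -- keys of A's fold: code_word p first, then the keys of the fold over the remainder
        have hkeys : ((p :: rest).foldl (pvAProp tw) PySem.Dict.empty).keys
            = code_word p :: ((rest.filter (fun q => !(code_word q == code_word p))).foldl
                (pvAProp tw) PySem.Dict.empty).keys := by
          rw [pvG1, pvG1]
          simp only [PySem.Dict.keys_empty]
          have h1 : pvFC [] (p :: rest) = pvFC [code_word p] rest := by
            simp [pvFC, List.foldl_cons]
          rw [h1, ← pvFC_filter (code_word p) rest [code_word p] (by simp)]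
          exact pvFC_cons (code_word p) _ hcne []
        -- lookups at keys ≠ code_word p agree between the two folds
        have hget : ∀ k, k ≠ code_word p →
            ((p :: rest).foldl (pvAProp tw) PySem.Dict.empty).get? k
              = ((rest.filter (fun q => !(code_word q == code_word p))).foldl
                  (pvAProp tw) PySem.Dict.empty).get? k := by
          intro k hk
          rw [pvG2, pvG2, PySem.Dict.get?_empty]
          congr 1
          have h0 : (code_word p == k) = false := by
            have hne : code_word p ≠ k := fun hh => hk hh.symm
            simp [hne]
          have h1 : (p :: rest).filter (fun q => code_word q == k)
              = rest.filter (fun q => code_word q == k) := by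
            simp [h0]
          rw [h1, List.filter_filter]
          apply List.filter_congr
          intro q _
          by_cases hq : code_word q = k
          · simp [hq, hk]
          · simp [hq]
        -- the head value: A's running best over the code_word-p group
        have hgc : ((p :: rest).foldl (pvAProp tw) PySem.Dict.empty).get? (code_word p)
            = some ((rest.filter (fun q => code_word q == code_word p)).foldl
                (fun b q => if tw.getD b 0 < tw.getD q 0 then q else b) p) := by
          rw [pvG2, PySem.Dict.get?_empty]
          have h1 : (p :: rest).filter (fun q => code_word q == code_word p)
              = p :: rest.filter (fun q => code_word q == code_word p) := by simp
          rw [h1, List.foldl_cons]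
          have : pvStepB (fun p => tw.getD p 0) none p = some p := rfl
          rw [this, pvStepB_some]
        -- B's head value is the same best, computed with bWeight
        have hbest : (PySem.List.max? ((p :: rest).filter (fun q => code_word q == code_word p))
              (fun q => bWeight items q)).getD p
            = (rest.filter (fun q => code_word q == code_word p)).foldl
                (fun b q => if tw.getD b 0 < tw.getD q 0 then q else b) p := by
          rw [max?_eq_foldl]
          have h1 : (p :: rest).filter (fun q => code_word q == code_word p)
              = p :: rest.filter (fun q => code_word q == code_word p) := by simp
          rw [h1, List.foldl_cons]
          have : pvStepB (fun q => bWeight items q) none p = some p := rfl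
          rw [this, pvStepB_some]
          simp only [Option.getD_some]
          symm
          apply pvFold_congr
          · exact hw p (List.mem_cons_self ..)
          · intro q hq
            exact hw q (List.mem_cons_of_mem _ (List.mem_of_mem_filter hq))
        -- assemble the items lists
        rw [PySem.Dict.items_eq_map_keys _ hndD [], hkeys, List.map_cons]
        congr 1
        · rw [PySem.Dict.getD_eq_get?_getD, hgc, hbest]
          rfl
        · rw [← hIH, PySem.Dict.items_eq_map_keys _ hndD' []]
          apply List.map_congr_left
          intro k hk
          have hk' : k ∈ pvFC [] (rest.filter (fun q => !(code_word q == code_word p))) := by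
            have hh := hk
            rw [pvG1, PySem.Dict.keys_empty] at hh
            exact hh
          have hkne : k ≠ code_word p := by
            rcases pvFC_mem _ _ _ hk' with h | ⟨q, hq, hcq⟩
            · simp at h
            · exact hcq ▸ hcne q hq
          rw [PySem.Dict.getD_eq_get?_getD, PySem.Dict.getD_eq_get?_getD, hget k hkne]

-- ===== VERDICT (by name: the statement is the Claim_ definition above) =====
theorem predictive_text_spec : Claim_equal_predictive_text := by
  intro dic _ _
  unfold Spec_predictive_text predictive_text predictive_text_alt
  simp only
  set items := (PySem.Dict.ofList dic).items with hitems
  have h := pvOuter items PySem.Dict.empty [] []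
    (by simp [PySem.Dict.keys_empty]) (by simp) (by simp)
    (fun p _ _ => bWeight_nil p)
  simp only [List.nil_append] at h
  rw [show (items.foldl pvAOuter PySem.Dict.empty).keys = items.foldl bPrefOuter [] from h.1]
  rw [pvMain items _ _ h.2]
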